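-- pv_equiv track=rewrite | github.com/dannym49/CalPoly-CPE101-Project3 | solverFuncs.py | check_columns_valid
-- ===== SOURCE A (Python) =====
-- def check_columns_valid(puzzle):
--    for col in range(5):
--       index_value=[]
--       for row in range(5):
--          index_value.append(puzzle[row][col])
--          #row is the first index which is the row,
--          #i is the index of that individual row
--          if index_value.count(puzzle[row][col]) > 1 and puzzle[row][col] != 0:
--                return False
--    return True
-- ===== SOURCE B (Python) =====
-- def check_columns_valid(puzzle):
--     def go(col, row, seen):
--         if col >= 5:
--             return True
--         if row >= 5:
--             return go(col + 1, 0, set())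
--         x = puzzle[row][col]
--         if x != 0 and x in seen:
--             return False
--         return go(col, row + 1, seen | {x})
--     return go(0, 0, set())
-- ===== Notes on version B (the rewrite author's own statement) =====
-- stated objective: alternative
-- what changed: B replaces A's nested for-loops with accumulator list and per-append .count rescan by a tail-recursive cell-by-cell state machine carrying a set of the values seen so far in the current column, so the quadratic rescan disappears.
import Mathlib
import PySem

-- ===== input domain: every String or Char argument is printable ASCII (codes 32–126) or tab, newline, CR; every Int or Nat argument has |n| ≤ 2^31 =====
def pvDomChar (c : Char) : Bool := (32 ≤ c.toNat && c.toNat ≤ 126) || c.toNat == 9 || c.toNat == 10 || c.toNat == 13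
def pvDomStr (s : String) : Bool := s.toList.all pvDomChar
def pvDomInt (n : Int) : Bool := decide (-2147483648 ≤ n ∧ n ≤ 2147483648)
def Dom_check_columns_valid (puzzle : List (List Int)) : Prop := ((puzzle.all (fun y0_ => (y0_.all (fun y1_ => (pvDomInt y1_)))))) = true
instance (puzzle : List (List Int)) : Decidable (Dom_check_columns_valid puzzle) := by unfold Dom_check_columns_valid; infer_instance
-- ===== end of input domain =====

-- B replaces A's nested loops + accumulator list + per-append .count rescan by one
-- tail-recursive cell-by-cell state machine carrying a set of the values seen in the
-- current column (objective: alternative).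

-- ===== PORT A =====
-- inner `for row in range(5)` loop; `index_value` is the growing accumulator list,
-- early `return False` modelled as returning false
def pvA_inner (puzzle : List (List Int)) (col : Int) : List Int → List Int → Bool
  | [], _ => true
  | row :: rs, index_value =>
    let x := PySem.List.pyGetD (PySem.List.pyGetD puzzle row []) col 0
    let iv := index_value ++ [x]
    if iv.count x > 1 ∧ x ≠ 0 then false
    else pvA_inner puzzle col rs iv

-- outer `for col in range(5)` loop
def pvA_outer (puzzle : List (List Int)) : List Int → Bool
  | [] => true
  | c :: cs =>
    if pvA_inner puzzle c (PySem.List.pyRange 0 5 1) [] then pvA_outer puzzle cs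
    else false

def check_columns_valid (puzzle : List (List Int)) : Bool :=
  pvA_outer puzzle (PySem.List.pyRange 0 5 1)

-- ===== PORT B =====
-- Source B's recursive `go(col, row, seen)`; counters are naturals in Python too
def pvB_go (puzzle : List (List Int)) (col row : Nat) (seen : PySem.Set Int) : Bool :=
  if 5 ≤ col then true
  else if 5 ≤ row then pvB_go puzzle (col + 1) 0 PySem.Set.empty
  else
    let x := PySem.List.pyGetD (PySem.List.pyGetD puzzle (row : Int) []) (col : Int) 0
    if x ≠ 0 ∧ PySem.Set.contains seen x then false
    else pvB_go puzzle col (row + 1) (PySem.Set.union seen (PySem.Set.ofList [x]))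
  termination_by (5 - col) * 6 + (5 - row)
  decreasing_by all_goals omega

def check_columns_valid_alt (puzzle : List (List Int)) : Bool :=
  pvB_go puzzle 0 0 PySem.Set.empty

-- ===== PRECONDITION & SPEC =====
-- Pre_ excludes exactly the inputs on which Python A raises IndexError: those where the
-- column-major scan reaches an out-of-range access before finding a nonzero duplicate.
-- A returns normally iff the grid is 5x5-accessible, or some column c has a nonzero
-- duplicate whose whole access prefix (all of columns < c, rows 0..r2 of column c) is valid.
def Pre_check_columns_valid (puzzle : List (List Int)) : Prop :=
  (5 ≤ puzzle.length ∧ ∀ r ∈ puzzle.take 5, 5 ≤ r.length) ∨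
  (∃ c ∈ List.range 5, ∃ r2 ∈ List.range 5,
    r2 < puzzle.length ∧
    (∀ r ∈ List.range (r2 + 1), c < (puzzle.getD r []).length) ∧
    (0 < c → 5 ≤ puzzle.length ∧ ∀ r ∈ List.range 5, c ≤ (puzzle.getD r []).length) ∧
    (puzzle.getD r2 []).getD c 0 ≠ 0 ∧
    (∃ r1 ∈ List.range r2, (puzzle.getD r1 []).getD c 0 = (puzzle.getD r2 []).getD c 0))
instance (puzzle : List (List Int)) : Decidable (Pre_check_columns_valid puzzle) := by
  unfold Pre_check_columns_valid; infer_instance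

def pvWitness_check_columns_valid : List (List Int) :=
  [[1,2,3,4,5],[0,0,0,0,0],[2,3,4,5,1],[0,1,0,1,0],[5,4,3,2,1]]

def Spec_check_columns_valid (puzzle : List (List Int)) (out : Bool) : Prop :=
  out = check_columns_valid_alt puzzle
instance (puzzle : List (List Int)) (out : Bool) : Decidable (Spec_check_columns_valid puzzle out) := by
  unfold Spec_check_columns_valid; infer_instance

-- ===== CLAIM (what is proved, stated in full; the proofs are below) =====
def Claim_equal_check_columns_valid : Prop :=
  ∀ (puzzle : List (List Int)), Dom_check_columns_valid puzzle →
    Pre_check_columns_valid puzzle →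
      Spec_check_columns_valid puzzle (check_columns_valid puzzle)

-- ===== LEMMAS AND PROOFS =====

-- rows correspondence: A's inner loop from row `r` with accumulator `acc` versus B's
-- state machine at cell (k, r) with a seen-set whose members are exactly acc's elements
theorem pv_rows_eq (puzzle : List (List Int)) (k : Nat) (hk : k < 5) :
    ∀ (n r : Nat), r + n = 5 →
      ∀ (acc : List Int) (seen : PySem.Set Int),
        (∀ y, PySem.Set.contains seen y = true ↔ y ∈ acc) →
        pvB_go puzzle k r seen =
          (if pvA_inner puzzle (k : Int) (PySem.List.pyRange (r : Int) 5 1) acc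
           then pvB_go puzzle (k + 1) 0 PySem.Set.empty else false) := by
  intro n
  induction n with
  | zero =>
    intro r hr acc seen hseen
    have hr5 : r = 5 := by omega
    subst hr5
    rw [PySem.List.pyRange_one_eq_nil (by norm_num)]
    rw [pvB_go]
    simp [hk, pvA_inner]
  | succ n ih =>
    intro r hr acc seen hseen
    have hrlt : r < 5 := by omega
    have hcast : ((r : Int) : Int) < 5 := by exact_mod_cast hrlt
    rw [PySem.List.pyRange_one_cons hcast]
    rw [pvB_go]
    rw [if_neg (by omega), if_neg (by omega)]
    set x := PySem.List.pyGetD (PySem.List.pyGetD puzzle (r : Int) []) (k : Int) 0 with hx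
    have hcnt : (acc ++ [x]).count x = acc.count x + 1 := by simp [List.count_append]
    by_cases hdup : x ≠ 0 ∧ x ∈ acc
    · have hB : x ≠ 0 ∧ PySem.Set.contains seen x = true := ⟨hdup.1, (hseen x).mpr hdup.2⟩
      have hA : List.count x (acc ++ [x]) > 1 ∧ x ≠ 0 :=
        ⟨by rw [hcnt]; have := List.count_pos_iff.mpr hdup.2; omega, hdup.1⟩
      have hAeq : pvA_inner puzzle (k : Int)
          ((r : Int) :: PySem.List.pyRange ((r : Int) + 1) 5 1) acc = false := by
        simp only [pvA_inner]
        rw [← hx, if_pos hA]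
      rw [if_pos hB, hAeq]
      simp
    · have hB : ¬ (x ≠ 0 ∧ PySem.Set.contains seen x = true) :=
        fun h => hdup ⟨h.1, (hseen x).mp h.2⟩
      have hA : ¬ (List.count x (acc ++ [x]) > 1 ∧ x ≠ 0) := by
        rintro ⟨h1, h2⟩
        rw [hcnt] at h1
        exact hdup ⟨h2, List.count_pos_iff.mp (by omega)⟩
      have hAeq : pvA_inner puzzle (k : Int)
          ((r : Int) :: PySem.List.pyRange ((r : Int) + 1) 5 1) acc =
          pvA_inner puzzle (k : Int) (PySem.List.pyRange ((r : Int) + 1) 5 1) (acc ++ [x]) := by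
        simp only [pvA_inner]
        rw [← hx, if_neg hA]
      rw [if_neg hB, hAeq]
      have hstep : ((r : Int) + 1) = (((r + 1 : Nat) : Int)) := by push_cast; ring
      rw [hstep]
      exact ih (r + 1) (by omega) (acc ++ [x])
        (PySem.Set.union seen (PySem.Set.ofList [x]))
        (by
          intro y
          rw [PySem.Set.contains_iff, PySem.Set.mem_union, PySem.Set.mem_ofList]
          simp only [List.mem_append, List.mem_singleton]
          rw [← PySem.Set.contains_iff, hseen y])

-- columns correspondence: A's outer loop from column k versus B's machine at (k, 0)
theorem pv_cols_eq (puzzle : List (List Int)) :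
    ∀ (n k : Nat), k + n = 5 →
      pvA_outer puzzle (PySem.List.pyRange (k : Int) 5 1) =
        pvB_go puzzle k 0 PySem.Set.empty := by
  intro n
  induction n with
  | zero =>
    intro k hk
    have hk5 : k = 5 := by omega
    subst hk5
    rw [PySem.List.pyRange_one_eq_nil (by norm_num)]
    rw [pvB_go]
    simp [pvA_outer]
  | succ n ih =>
    intro k hk
    have hklt : k < 5 := by omega
    have hcast : ((k : Int) : Int) < 5 := by exact_mod_cast hklt
    rw [PySem.List.pyRange_one_cons hcast]
    simp only [pvA_outer]
    have hrows := pv_rows_eq puzzle k hklt 5 0 (by omega) [] PySem.Set.empty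
      (by intro y; simp [PySem.Set.empty])
    have hstep : ((k : Int) + 1) = (((k + 1 : Nat) : Int)) := by push_cast; ring
    rw [show ((0 : Nat) : Int) = (0 : Int) by norm_num] at hrows
    rw [hrows, hstep, ih (k + 1) (by omega)]

-- ===== VERDICT (by name: the statement is the Claim_ definition above) =====
theorem check_columns_valid_spec : Claim_equal_check_columns_valid := by
  intro puzzle _ _
  unfold Spec_check_columns_valid check_columns_valid check_columns_valid_alt
  have := pv_cols_eq puzzle 5 0 (by omega)
  simpa using this
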